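-- pv_equiv track=rewrite | github.com/Poooooooooja-k/Data_structure_basics | STRING/capohfalf.py | half_cap
-- ===== SOURCE A (Python) =====
-- def half_cap(sent):
--     res=" "
--     half=len(sent)//2
--     for i in range(len(sent)):
--         if i<half:
--             res+=sent[i].upper()
--         else:
--             res+=sent[i]
--     return res
-- ===== SOURCE B (Python) =====
-- def half_cap(sent):
--     half = len(sent) // 2
--     return " " + sent[:half].upper() + sent[half:]
-- ===== Notes on version B (the rewrite author's own statement) =====
-- stated objective: simpler
-- what changed: Replaces the per-index loop with a per-character branch by a single expression of two slices: bulk-uppercase the first half and concatenate once, keeping the leading-space seed.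
import Mathlib
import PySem

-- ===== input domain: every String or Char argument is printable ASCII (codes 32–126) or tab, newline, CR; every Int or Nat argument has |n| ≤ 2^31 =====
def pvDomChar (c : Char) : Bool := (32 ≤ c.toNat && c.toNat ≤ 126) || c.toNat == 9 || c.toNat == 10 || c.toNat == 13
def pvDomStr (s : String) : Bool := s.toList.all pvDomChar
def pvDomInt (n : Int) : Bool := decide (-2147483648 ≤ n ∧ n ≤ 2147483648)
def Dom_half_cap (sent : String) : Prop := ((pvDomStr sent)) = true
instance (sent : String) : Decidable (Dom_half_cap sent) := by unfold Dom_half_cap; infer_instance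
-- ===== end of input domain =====

-- B replaces A's per-index loop with a single slice expression (bulk-uppercase the first half); objective: simpler.


-- ===== PORT A =====
-- loop 'for i in range(len(sent))', appending one character per step; res is modeled
-- as its char list ([' '] = the seed res = " "), turned back into a String at the end
def half_cap (sent : String) : String :=
  let s := sent.toList
  let half : Int := PySem.Int.floordiv (PySem.Chars.len s) 2
  String.ofList ((PySem.List.pyRange 0 (PySem.Chars.len s) 1).foldl
    (fun res i =>
      if i < half then res ++ ((PySem.List.pyGet? s i).map PySem.Chars.upperChar).toList
      else res ++ (PySem.List.pyGet? s i).toList) [' '])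

-- ===== PORT B =====
-- ' ' + sent[:half].upper() + sent[half:]
def half_cap_alt (sent : String) : String :=
  let half : Int := PySem.Int.floordiv (PySem.Str.len sent) 2
  " " ++ PySem.Str.upper (PySem.Str.slice sent none (some half)) ++ PySem.Str.slice sent (some half) none

-- ===== PRECONDITION & SPEC =====
def Spec_half_cap (sent : String) (out : String) : Prop := out = half_cap_alt sent
instance (sent : String) (out : String) : Decidable (Spec_half_cap sent out) := by unfold Spec_half_cap; infer_instance

-- ===== CLAIM (what is proved, stated in full; the proofs are below) =====
def Claim_equal_half_cap : Prop := ∀ (sent : String), Dom_half_cap sent → Spec_half_cap sent (half_cap sent)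

-- ===== LEMMAS AND PROOFS =====

-- A's loop result, characterised: a space, then the first half uppercased, then the rest
theorem half_cap_toList (sent : String) :
    (half_cap sent).toList =
      ' ' :: (sent.toList.take (sent.toList.length / 2)).map PySem.Chars.upperChar
        ++ sent.toList.drop (sent.toList.length / 2) := by
  unfold half_cap
  dsimp only
  set s := sent.toList with hs
  set n := s.length with hn
  have hf : PySem.Int.floordiv (PySem.Chars.len s) 2 = ((n/2 : Nat) : Int) := by
    simp only [PySem.Chars.len_eq]
    exact_mod_cast PySem.Int.floordiv_natCast n 2
  have hlen : PySem.Chars.len s = (n : Int) := by simp only [PySem.Chars.len_eq]; rw [hn]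
  rw [hf, hlen]
  rw [PySem.List.pyRange_one_append 0 ((n/2 : Nat) : Int) (n : Int) (by positivity)
    (by exact_mod_cast Nat.div_le_self n 2), List.foldl_append]
  -- first segment: every step appends the uppercased character, i.e. an element of t
  set t := (s.take (n/2)).map PySem.Chars.upperChar with ht
  have htlen : t.length = n/2 := by simp [ht, hn]; omega
  have h1 : ∀ (acc : List Char) (i : Int), i ∈ PySem.List.pyRange 0 ((n/2 : Nat) : Int) 1 →
      (if i < ((n/2 : Nat) : Int) then acc ++ ((PySem.List.pyGet? s i).map PySem.Chars.upperChar).toList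
       else acc ++ (PySem.List.pyGet? s i).toList)
      = acc ++ [PySem.List.pyGetD t i ' '] := by
    intro acc i hi
    rw [PySem.List.mem_pyRange_one] at hi
    obtain ⟨h0, hlt⟩ := hi
    rw [if_pos hlt]
    have hiN : i = ((i.toNat : Nat) : Int) := (Int.toNat_of_nonneg h0).symm
    have hbound : i.toNat < n/2 := by omega
    rw [hiN, PySem.List.pyGet?_natCast, PySem.List.pyGetD_natCast]
    have hsl : i.toNat < s.length := by omega
    simp [ht, List.getD, List.getElem?_map, List.getElem?_eq_getElem hsl, hbound]
  have e1 := PySem.List.foldl_congr_mem _ _ _ (init := ([' '] : List Char)) h1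
  rw [e1]
  have h2 : (PySem.List.pyRange 0 ((n/2 : Nat) : Int) 1).foldl
      (fun acc i => acc ++ [PySem.List.pyGetD t i ' ']) [' '] = [' '] ++ t := by
    have := PySem.List.foldl_pyRange_zero_pyGetD t ' ' (fun acc c => acc ++ [c]) [' ']
    rw [show PySem.List.len t = ((n/2 : Nat) : Int) by simp [PySem.List.len, htlen]] at this
    rw [this, PySem.List.foldl_append_singleton]
  rw [h2]
  -- second segment: every step appends the character itself
  have h3 : ∀ (acc : List Char) (i : Int), i ∈ PySem.List.pyRange ((n/2 : Nat) : Int) (n : Int) 1 →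
      (if i < ((n/2 : Nat) : Int) then acc ++ ((PySem.List.pyGet? s i).map PySem.Chars.upperChar).toList
       else acc ++ (PySem.List.pyGet? s i).toList)
      = acc ++ [PySem.List.pyGetD s i ' '] := by
    intro acc i hi
    rw [PySem.List.mem_pyRange_one] at hi
    obtain ⟨h0, hlt⟩ := hi
    rw [if_neg (by omega)]
    have h0' : (0:Int) ≤ i := le_trans (by positivity) h0
    have hiN : i = ((i.toNat : Nat) : Int) := (Int.toNat_of_nonneg h0').symm
    rw [hiN, PySem.List.pyGet?_natCast, PySem.List.pyGetD_natCast]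
    have hsl : i.toNat < s.length := by omega
    simp [List.getD, List.getElem?_eq_getElem hsl]
  have e3 := PySem.List.foldl_congr_mem _ _ _ (init := ([' '] ++ t : List Char)) h3
  rw [e3]
  have h4 := PySem.List.foldl_pyRange_pyGetD s ' ' (fun acc c => acc ++ [c]) ([' '] ++ t)
      (a := ((n/2 : Nat) : Int)) (by positivity)
  rw [show PySem.List.len s = (n : Int) by simp [PySem.List.len, hn]] at h4
  rw [h4, PySem.List.foldl_append_singleton]
  simp [ht]
  omega

-- B's slice expression, characterised the same way
theorem half_cap_alt_toList (sent : String) :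
    (half_cap_alt sent).toList =
      ' ' :: (sent.toList.take (sent.toList.length / 2)).map PySem.Chars.upperChar
        ++ sent.toList.drop (sent.toList.length / 2) := by
  unfold half_cap_alt
  dsimp only
  have hf : PySem.Int.floordiv (PySem.Str.len sent) 2 = ((sent.toList.length / 2 : Nat) : Int) := by
    simp only [PySem.Str.len_eq]
    exact_mod_cast PySem.Int.floordiv_natCast sent.toList.length 2
  simp only [String.toList_append, PySem.Str.toList_upper, PySem.Str.toList_slice]
  rw [hf]
  simp only [PySem.Chars.slice_eq_listSlice]
  rw [PySem.List.slice_to_natCast, PySem.List.slice_from_natCast]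
  simp only [PySem.Chars.upper, List.map_take, String.toList]
  rfl

-- ===== VERDICT (by name: the statement is the Claim_ definition above) =====
theorem half_cap_spec : Claim_equal_half_cap := by
  intro sent _
  unfold Spec_half_cap
  have h := (half_cap_toList sent).trans (half_cap_alt_toList sent).symm
  exact String.toList_inj.mp h
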